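-- pv_equiv track=rewrite | github.com/irupawala/Ibrahim-List | Ibrahim Personal/Ready/ADMSU/AoG/Assignments/week2_graph_decomposition2/3_reachable/strongly_connected.py | dfs_post_order
-- ===== SOURCE A (Python) =====
-- def explore_post_order(adj_list, visited, post_order, n, clock):
--     visited[n] = True
--     clock  = clock + 1 # to mark previsit
--     for x in adj_list[n]:
--         if visited[x] == False:
--             clock, post_order = explore_post_order(adj_list, visited, post_order, x, clock)
--     clock  = clock + 1
--     post_order[n] = clock
--     return clock, post_order
--
-- def dfs_post_order(adj_list):
--
--     visited = [False] * len(adj_list)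
--     post_order = [-1] * len(adj_list)
--     connected_comp = 0
--     clock = 0
--     #write your code here
--     for index, vertex in enumerate(adj_list):
--         if visited[index] == False:
--             clock, post_order = explore_post_order(adj_list, visited, post_order, index, clock)
--             connected_comp = connected_comp + 1
--
--     return post_order, connected_comp
-- ===== SOURCE B (Python) =====
-- def dfs_post_order(adj_list):
--     n = len(adj_list)
--     visited = [False] * n
--     post_order = [-1] * n
--     connected_comp = 0
--     clock = 0
--     for root in range(n):
--         if not visited[root]:
--             connected_comp += 1
--             visited[root] = True
--             clock += 1
--             stack = [(root, 0)]
--             while stack: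
--                 v, i = stack[-1]
--                 nbrs = adj_list[v]
--                 if i < len(nbrs):
--                     stack[-1] = (v, i + 1)
--                     x = nbrs[i]
--                     if not visited[x]:
--                         visited[x] = True
--                         clock += 1
--                         stack.append((x, 0))
--                 else:
--                     stack.pop()
--                     clock += 1
--                     post_order[v] = clock
--     return post_order, connected_comp
-- ===== Notes on version B (the rewrite author's own statement) =====
-- stated objective: alternative
-- what changed: The recursive explore_post_order helper is replaced by an explicit stack of (vertex, next-neighbor-position) frames inside a single iterative loop, keeping the same visited/post_order/clock bookkeeping.
import Mathlib
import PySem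

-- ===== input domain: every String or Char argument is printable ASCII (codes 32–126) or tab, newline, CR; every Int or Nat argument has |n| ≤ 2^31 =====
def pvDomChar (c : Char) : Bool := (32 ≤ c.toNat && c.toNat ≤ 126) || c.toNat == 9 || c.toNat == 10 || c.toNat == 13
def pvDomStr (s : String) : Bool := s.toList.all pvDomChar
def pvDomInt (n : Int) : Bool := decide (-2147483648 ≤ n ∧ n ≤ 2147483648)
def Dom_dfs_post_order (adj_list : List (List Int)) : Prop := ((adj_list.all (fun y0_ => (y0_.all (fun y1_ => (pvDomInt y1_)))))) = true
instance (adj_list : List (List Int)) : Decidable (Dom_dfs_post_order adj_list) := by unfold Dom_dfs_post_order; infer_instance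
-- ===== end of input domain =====

-- B replaces A's recursive `explore_post_order` by an explicit stack-based DFS with the same
-- clock/post-order bookkeeping (objective: alternative decomposition, iterative instead of recursive).

-- Shared Python-primitive helpers (Python index semantics via PySem; used by both ports).
-- DFS state: visited list, post_order list, clock.
structure PvSt where
  vis : List Bool
  post : List Int
  clock : Int
deriving Repr, DecidableEq

-- Python `visited[x]` (out-of-range would raise IndexError; such inputs are outside Pre_).
def pvGetVis (vis : List Bool) (x : Int) : Bool := (PySem.List.pyGet? vis x).getD true
-- Python `visited[x] = True` / `post_order[n] = clock` (index semantics of pySetD).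
def pvSetTrue (vis : List Bool) (x : Int) : List Bool := PySem.List.pySetD vis x true
def pvSetPost (post : List Int) (x : Int) (c : Int) : List Int := PySem.List.pySetD post x c
-- Python `adj_list[v]`.
def pvAdjAt (adj : List (List Int)) (v : Int) : List Int := (PySem.List.pyGet? adj v).getD []
-- number of unvisited vertices (termination measure only)
def pvCountFalse (vis : List Bool) : Nat := vis.countP (fun b => !b)

-- lemmas the ports' termination proofs cite
theorem pvCountFalse_set_lt (vis : List Bool) (k : Nat) (h : vis[k]? = some false) :
    pvCountFalse (vis.set k true) < pvCountFalse vis := by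
  induction vis generalizing k with
  | nil => simp at h
  | cons b t ih =>
    cases k with
    | zero =>
      simp at h
      subst h
      simp [pvCountFalse]
    | succ k =>
      simp at h
      have := ih k h
      simp [pvCountFalse, List.countP_cons] at this ⊢
      omega

theorem pvGetVis_false (vis : List Bool) (x : Int) (h : pvGetVis vis x = false) :
    ∃ k, PySem.List.pyIdx? vis.length x = some k ∧ vis[k]? = some false := by
  unfold pvGetVis PySem.List.pyGet? at h
  cases hk : PySem.List.pyIdx? vis.length x with
  | none => rw [hk] at h; simp at h
  | some k =>
    rw [hk] at h
    simp only [Option.bind_some] at h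
    cases hv : vis[k]? with
    | none => rw [hv] at h; simp at h
    | some b => rw [hv] at h; simp at h; subst h; exact ⟨k, rfl, hv⟩

theorem pvSetTrue_lt (vis : List Bool) (x : Int) (h : pvGetVis vis x = false) :
    pvCountFalse (pvSetTrue vis x) < pvCountFalse vis := by
  obtain ⟨k, hk, hv⟩ := pvGetVis_false vis x h
  unfold pvSetTrue PySem.List.pySetD PySem.List.pySet?
  rw [hk]
  simpa using pvCountFalse_set_lt vis k hv

-- ===== PORT A =====
-- `explore_post_order`: the fuel argument is only a totality guard for the recursion;
-- fuel = |V| + 1 always suffices (proved below), so `none` is never reached on any input.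
mutual
def pvExploreA (adj : List (List Int)) : Nat → Int → PvSt → Option PvSt
  | 0, _, _ => none
  | f + 1, n, s =>
    -- visited[n] = True; clock = clock + 1; loop over adj_list[n]; clock = clock + 1; post_order[n] = clock
    (pvGoA adj f (pvAdjAt adj n) ⟨pvSetTrue s.vis n, s.post, s.clock + 1⟩).map
      (fun t => ⟨t.vis, pvSetPost t.post n (t.clock + 1), t.clock + 1⟩)
  termination_by f _ _ => (f, 0)

def pvGoA (adj : List (List Int)) (f : Nat) : List Int → PvSt → Option PvSt
  | [], s => some s
  | x :: xs, s =>
    if pvGetVis s.vis x = false then (pvExploreA adj f x s).bind (pvGoA adj f xs)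
    else pvGoA adj f xs s
  termination_by l _ => (f, l.length + 1)
end

def dfs_post_order (adj_list : List (List Int)) : List Int × Int :=
  let r := (PySem.List.enumerate adj_list).foldl
    (fun (st : PvSt × Int) iv =>
      if pvGetVis st.1.vis iv.1 = false then
        match pvExploreA adj_list (adj_list.length + 1) iv.1 st.1 with
        | some t => (t, st.2 + 1)
        | none => (st.1, st.2 + 1)   -- fuel exhausted: unreachable, fuel = |V|+1 bounds the recursion depth (proved below)
      else st)
    (⟨List.replicate adj_list.length false, List.replicate adj_list.length (-1 : Int), 0⟩, 0)
  (r.1.post, r.2)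

-- ===== PORT B =====
-- the `while stack:` loop of Source B; terminates by (unvisited count, remaining work) so no fuel is needed
def pvRunB (adj : List (List Int)) : List (Int × Nat) → PvSt → PvSt
  | [], s => s
  | (v, i) :: frames, s =>
    if h : i < (pvAdjAt adj v).length then
      if hx : pvGetVis s.vis ((pvAdjAt adj v)[i]) = false then
        pvRunB adj (((pvAdjAt adj v)[i], 0) :: (v, i + 1) :: frames)
          ⟨pvSetTrue s.vis ((pvAdjAt adj v)[i]), s.post, s.clock + 1⟩
      else
        pvRunB adj ((v, i + 1) :: frames) s
    else
      pvRunB adj frames ⟨s.vis, pvSetPost s.post v (s.clock + 1), s.clock + 1⟩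
  termination_by stack s =>
    (pvCountFalse s.vis, (stack.map (fun p => (pvAdjAt adj p.1).length - p.2)).sum + stack.length)
  decreasing_by
  · exact Prod.Lex.left _ _ (pvSetTrue_lt _ _ hx)
  · apply Prod.Lex.right
    simp only [List.map_cons, List.sum_cons, List.length_cons]
    omega
  · apply Prod.Lex.right
    simp only [List.map_cons, List.sum_cons, List.length_cons]
    omega

def dfs_post_order_alt (adj_list : List (List Int)) : List Int × Int :=
  let r := (PySem.List.pyRange 0 adj_list.length 1).foldl
    (fun (st : PvSt × Int) root =>
      if pvGetVis st.1.vis root = false then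
        (pvRunB adj_list [(root, 0)] ⟨pvSetTrue st.1.vis root, st.1.post, st.1.clock + 1⟩, st.2 + 1)
      else st)
    (⟨List.replicate adj_list.length false, List.replicate adj_list.length (-1 : Int), 0⟩, 0)
  (r.1.post, r.2)

-- ===== PRECONDITION & SPEC =====
-- Pre_ excludes exactly the adjacency lists with a reachable neighbour label outside
-- [-len, len), on which Python's `visited[x]` raises IndexError (stated for all labels,
-- which is closed-form; labels in [-len, 0) follow Python's index wraparound in both ports).
def Pre_dfs_post_order (adj_list : List (List Int)) : Prop :=
  ∀ l ∈ adj_list, ∀ x ∈ l, PySem.Raise.InRange adj_list.length x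
instance (adj_list : List (List Int)) : Decidable (Pre_dfs_post_order adj_list) := by
  unfold Pre_dfs_post_order; infer_instance

def pvWitness_dfs_post_order : List (List Int) := [[1], [0, 2], []]

def Spec_dfs_post_order (adj_list : List (List Int)) (out : List Int × Int) : Prop := out = dfs_post_order_alt adj_list
instance (adj_list : List (List Int)) (out : List Int × Int) : Decidable (Spec_dfs_post_order adj_list out) := by unfold Spec_dfs_post_order; infer_instance

-- ===== CLAIM (what is proved, stated in full; the proofs are below) =====
def Claim_equal_dfs_post_order : Prop := ∀ (adj_list : List (List Int)), Dom_dfs_post_order adj_list → Pre_dfs_post_order adj_list → Spec_dfs_post_order adj_list (dfs_post_order adj_list)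

-- ===== LEMMAS AND PROOFS =====

theorem pvLen_setTrue (vis : List Bool) (x : Int) : (pvSetTrue vis x).length = vis.length := by
  simp [pvSetTrue, PySem.List.length_pySetD]

theorem pvCountFalse_set_le (vis : List Bool) (k : Nat) :
    pvCountFalse (vis.set k true) ≤ pvCountFalse vis := by
  induction vis generalizing k with
  | nil => simp [pvCountFalse]
  | cons b t ih =>
    cases k with
    | zero => cases b <;> simp [pvCountFalse]
    | succ k =>
      have := ih k
      simp only [List.set_cons_succ]
      simp [pvCountFalse, List.countP_cons] at this ⊢
      omega

theorem pvSetTrue_le (vis : List Bool) (x : Int) :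
    pvCountFalse (pvSetTrue vis x) ≤ pvCountFalse vis := by
  unfold pvSetTrue PySem.List.pySetD PySem.List.pySet?
  cases hk : PySem.List.pyIdx? vis.length x with
  | none => simp
  | some k => simpa using pvCountFalse_set_le vis k

theorem pvCountFalse_pos (vis : List Bool) (x : Int) (h : pvGetVis vis x = false) :
    1 ≤ pvCountFalse vis := by
  obtain ⟨k, _, hv⟩ := pvGetVis_false vis x h
  have hm : false ∈ vis := List.mem_of_getElem? hv
  have : 0 < vis.countP (fun b => !b) := List.countP_pos_iff.2 ⟨false, hm, rfl⟩
  simpa [pvCountFalse] using this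

theorem pvCountFalse_le_length (vis : List Bool) : pvCountFalse vis ≤ vis.length :=
  List.countP_le_length

theorem pvGoA_mono (adj : List (List Int)) :
    ∀ f todo (s s' : PvSt), pvGoA adj f todo s = some s' →
      pvCountFalse s'.vis ≤ pvCountFalse s.vis ∧ s'.vis.length = s.vis.length := by
  intro f
  induction f using Nat.strong_induction_on with
  | _ f ih =>
    intro todo
    induction todo with
    | nil =>
      intro s s' h
      simp only [pvGoA] at h
      obtain rfl : s = s' := by injection h
      exact ⟨le_refl _, rfl⟩
    | cons x xs ihx =>
      intro s s' h
      simp only [pvGoA] at h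
      by_cases hx : pvGetVis s.vis x = false
      · rw [if_pos hx] at h
        cases f with
        | zero => simp [pvExploreA] at h
        | succ g =>
          simp only [pvExploreA] at h
          cases hm : pvGoA adj g (pvAdjAt adj x) ⟨pvSetTrue s.vis x, s.post, s.clock + 1⟩ with
          | none => rw [hm] at h; simp at h
          | some t =>
            rw [hm] at h
            simp only [Option.map_some, Option.bind_some] at h
            have h1 := ih g (Nat.lt_succ_self g) (pvAdjAt adj x) _ _ hm
            have h2 := ihx _ _ h
            refine ⟨?_, ?_⟩
            · calc pvCountFalse s'.vis ≤ pvCountFalse t.vis := h2.1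
                _ ≤ pvCountFalse (pvSetTrue s.vis x) := h1.1
                _ ≤ pvCountFalse s.vis := pvSetTrue_le s.vis x
            · calc s'.vis.length = t.vis.length := h2.2
                _ = (pvSetTrue s.vis x).length := h1.2
                _ = s.vis.length := pvLen_setTrue s.vis x
      · rw [if_neg hx] at h
        exact ihx _ _ h

theorem pvGoA_some (adj : List (List Int)) :
    ∀ f todo (s : PvSt), s.vis.length = adj.length → pvCountFalse s.vis ≤ f →
      ∃ s', pvGoA adj f todo s = some s' := by
  intro f
  induction f using Nat.strong_induction_on with
  | _ f ih =>
    intro todo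
    induction todo with
    | nil =>
      intro s _ _
      exact ⟨s, by simp only [pvGoA]⟩
    | cons x xs ihx =>
      intro s hlen hcf
      by_cases hx : pvGetVis s.vis x = false
      · have h1 := pvCountFalse_pos s.vis x hx
        obtain ⟨g, rfl⟩ : ∃ g, f = g + 1 := ⟨f - 1, by omega⟩
        have hlt := pvSetTrue_lt s.vis x hx
        obtain ⟨t, ht⟩ := ih g (Nat.lt_succ_self g) (pvAdjAt adj x)
          ⟨pvSetTrue s.vis x, s.post, s.clock + 1⟩
          (by show (pvSetTrue s.vis x).length = adj.length; rw [pvLen_setTrue]; exact hlen)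
          (by show pvCountFalse (pvSetTrue s.vis x) ≤ g; omega)
        have hmono := pvGoA_mono adj g (pvAdjAt adj x) _ _ ht
        have hm1 : pvCountFalse t.vis ≤ pvCountFalse (pvSetTrue s.vis x) := hmono.1
        have hm2 : t.vis.length = (pvSetTrue s.vis x).length := hmono.2
        obtain ⟨s', hs'⟩ := ihx ⟨t.vis, pvSetPost t.post x (t.clock + 1), t.clock + 1⟩
          (by show t.vis.length = adj.length; rw [hm2, pvLen_setTrue]; exact hlen)
          (by show pvCountFalse t.vis ≤ g + 1; omega)
        refine ⟨s', ?_⟩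
        simp only [pvGoA, pvExploreA]
        rw [if_pos hx, ht]
        simpa using hs'
      · obtain ⟨s', hs'⟩ := ihx s hlen hcf
        refine ⟨s', ?_⟩
        simp only [pvGoA]
        rw [if_neg hx]
        exact hs'

theorem pvSim (adj : List (List Int)) :
    ∀ f todo (v : Int) (i : Nat) frames (s s' : PvSt),
      todo = (pvAdjAt adj v).drop i → pvGoA adj f todo s = some s' →
      pvRunB adj ((v, i) :: frames) s =
        pvRunB adj frames ⟨s'.vis, pvSetPost s'.post v (s'.clock + 1), s'.clock + 1⟩ := by
  intro f
  induction f using Nat.strong_induction_on with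
  | _ f ih =>
    intro todo
    induction todo with
    | nil =>
      intro v i frames s s' hdrop h
      simp only [pvGoA] at h
      obtain rfl : s = s' := by injection h
      have hlen : (pvAdjAt adj v).length ≤ i := by
        have := congrArg List.length hdrop
        simp [List.length_drop] at this
        omega
      rw [pvRunB, dif_neg (by omega)]
    | cons x xs ihx =>
      intro v i frames s s' hdrop h
      have hi : i < (pvAdjAt adj v).length := by
        have := congrArg List.length hdrop
        simp [List.length_drop] at this
        omega
      have hget : (pvAdjAt adj v)[i] = x := by
        have h0 : ((pvAdjAt adj v).drop i)[0]'(by rw [← hdrop]; simp) = x := by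
          simp [← hdrop]
        rw [List.getElem_drop] at h0
        simpa using h0
      have hxs : xs = (pvAdjAt adj v).drop (i + 1) := by
        have : (pvAdjAt adj v).drop (i + 1) = ((pvAdjAt adj v).drop i).drop 1 := by
          rw [List.drop_drop]
        rw [this, ← hdrop]
        simp
      simp only [pvGoA] at h
      rw [pvRunB, dif_pos hi, hget]
      by_cases hx : pvGetVis s.vis x = false
      · rw [if_pos hx] at h
        rw [dif_pos hx]
        cases f with
        | zero => simp [pvExploreA] at h
        | succ g =>
          simp only [pvExploreA] at h
          cases hm : pvGoA adj g (pvAdjAt adj x) ⟨pvSetTrue s.vis x, s.post, s.clock + 1⟩ with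
          | none => rw [hm] at h; simp at h
          | some t =>
            rw [hm] at h
            simp only [Option.map_some, Option.bind_some] at h
            have e1 := ih g (Nat.lt_succ_self g) (pvAdjAt adj x) x 0 ((v, i + 1) :: frames)
              ⟨pvSetTrue s.vis x, s.post, s.clock + 1⟩ t (by simp) hm
            rw [e1]
            exact ihx v (i + 1) frames _ s' hxs h
      · rw [if_neg hx] at h
        rw [dif_neg hx]
        exact ihx v (i + 1) frames s s' hxs h

theorem pvOuter (adj : List (List Int)) :
    ∀ (idxs : List Int) (sc : PvSt × Int),
      sc.1.vis.length = adj.length →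
      idxs.foldl (fun (st : PvSt × Int) j =>
          if pvGetVis st.1.vis j = false then
            match pvExploreA adj (adj.length + 1) j st.1 with
            | some t => (t, st.2 + 1)
            | none => (st.1, st.2 + 1)
          else st) sc
      = idxs.foldl (fun (st : PvSt × Int) root =>
          if pvGetVis st.1.vis root = false then
            (pvRunB adj [(root, 0)] ⟨pvSetTrue st.1.vis root, st.1.post, st.1.clock + 1⟩, st.2 + 1)
          else st) sc := by
  intro idxs
  induction idxs with
  | nil => intro sc _; rfl
  | cons j rest ihr =>
    intro sc hlen
    simp only [List.foldl_cons]
    by_cases hj : pvGetVis sc.1.vis j = false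
    · rw [if_pos hj, if_pos hj]
      obtain ⟨t, ht⟩ := pvGoA_some adj adj.length (pvAdjAt adj j)
        ⟨pvSetTrue sc.1.vis j, sc.1.post, sc.1.clock + 1⟩
        (by show (pvSetTrue sc.1.vis j).length = adj.length; rw [pvLen_setTrue]; exact hlen)
        (by show pvCountFalse (pvSetTrue sc.1.vis j) ≤ adj.length
            have h1 := pvSetTrue_le sc.1.vis j
            have h2 := pvCountFalse_le_length sc.1.vis
            omega)
      have hexp : pvExploreA adj (adj.length + 1) j sc.1
          = some ⟨t.vis, pvSetPost t.post j (t.clock + 1), t.clock + 1⟩ := by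
        simp only [pvExploreA]
        rw [ht]
        rfl
      have hrun : pvRunB adj [(j, 0)] ⟨pvSetTrue sc.1.vis j, sc.1.post, sc.1.clock + 1⟩
          = ⟨t.vis, pvSetPost t.post j (t.clock + 1), t.clock + 1⟩ := by
        have := pvSim adj adj.length (pvAdjAt adj j) j 0 [] _ t (by simp) ht
        rw [this, pvRunB]
      rw [hexp, hrun]
      have hmono := pvGoA_mono adj adj.length (pvAdjAt adj j) _ _ ht
      have hm2 : t.vis.length = (pvSetTrue sc.1.vis j).length := hmono.2
      exact ihr _ (by show t.vis.length = adj.length; rw [hm2, pvLen_setTrue]; exact hlen)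
    · rw [if_neg hj, if_neg hj]
      exact ihr sc hlen

-- ===== VERDICT (by name: the statement is the Claim_ definition above) =====
theorem dfs_post_order_spec : Claim_equal_dfs_post_order := by
  intro adj _ _
  unfold Spec_dfs_post_order dfs_post_order dfs_post_order_alt
  have hmap : ((PySem.List.enumerate adj).map (·.1)) = PySem.List.pyRange 0 adj.length 1 := by
    simpa using PySem.List.map_fst_enumerate adj 0
  rw [show (PySem.List.enumerate adj).foldl
      (fun (st : PvSt × Int) iv =>
        if pvGetVis st.1.vis iv.1 = false then
          match pvExploreA adj (adj.length + 1) iv.1 st.1 with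
          | some t => (t, st.2 + 1)
          | none => (st.1, st.2 + 1)
        else st)
      (⟨⟨List.replicate adj.length false, List.replicate adj.length (-1 : Int), 0⟩, 0⟩ : PvSt × Int)
    = (PySem.List.pyRange 0 adj.length 1).foldl
      (fun (st : PvSt × Int) j =>
        if pvGetVis st.1.vis j = false then
          match pvExploreA adj (adj.length + 1) j st.1 with
          | some t => (t, st.2 + 1)
          | none => (st.1, st.2 + 1)
        else st)
      (⟨⟨List.replicate adj.length false, List.replicate adj.length (-1 : Int), 0⟩, 0⟩ : PvSt × Int)
    from by rw [← hmap, List.foldl_map]]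
  rw [pvOuter adj (PySem.List.pyRange 0 adj.length 1) _ (by simp)]
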